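-- pv_equiv track=rewrite | github.com/jfjlaros/motif-edit | splice/parse_gtf.py | skippable_exons
-- ===== SOURCE A (Python) =====
-- def skippable_exons(exons):
--     """ Determine which exon(s) can be skipped
--
--     For each exon (except the first and second, which cannot be skipped), we
--     want to find the minimum number of exons which together have a size that
--     can be divided by 3.
--     >>> list(skippable_exons([30]))
--     []
--     >>> list(skippable_exons([30,30]))
--     []
--     >>> list(skippable_exons([30,30,30]))
--     [[1]]
--     >>> list(skippable_exons([30,30,30,30]))
--     [[1], [2]]
--     >>> list(skippable_exons([30,31,32,30]))
--     [[1, 2]]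
--     >>> list(skippable_exons([30,32,32,30]))
--     []
--
--     """
--     # If there are less than 3 exons, there is nothing to skip
--     if len(exons) < 3:
--         return []
--
--     # We check every exon that isn't the first or the last
--     for i in range(1,len(exons)):
--         # Test every sub-sequence of exons, starting from the current exon
--         for j in range(i+1, len(exons)):
--             # Determine the total lenght of the exons we are considering
--             total_length = sum(exons[i:j])
--             if total_length%3 == 0:
--                 yield list(range(i,j))
--                 # Once we found the minimum number of exons to skip to stay in
--                 # frame (can be 1), we are not interested in skipping more
--                 break
-- ===== SOURCE B (Python) =====
-- def skippable_exons(exons):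
--     """Prefix sums mod 3 + a right-to-left next-index-per-residue table: O(n)."""
--     n = len(exons)
--     if n < 3:
--         return
--     pref = [0]
--     for e in exons[:n - 1]:
--         pref.append((pref[-1] + e) % 3)
--     # nxt[r] = smallest index j seen so far (scanning right-to-left) with pref[j] == r, else n
--     nxt = [n, n, n]
--     out = []
--     for i in range(n - 2, 0, -1):
--         nxt[pref[i + 1]] = i + 1
--         j = nxt[pref[i]]
--         if j < n:
--             out.append(list(range(i, j)))
--     yield from reversed(out)
-- ===== Notes on version B (the rewrite author's own statement) =====
-- stated objective: faster
-- what changed: Instead of re-summing every candidate slice for every start index, B computes prefix sums mod 3 once and fills a next-index-per-residue table in a single right-to-left pass, so each start's minimal in-frame stretch is an O(1) lookup.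
import Mathlib
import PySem

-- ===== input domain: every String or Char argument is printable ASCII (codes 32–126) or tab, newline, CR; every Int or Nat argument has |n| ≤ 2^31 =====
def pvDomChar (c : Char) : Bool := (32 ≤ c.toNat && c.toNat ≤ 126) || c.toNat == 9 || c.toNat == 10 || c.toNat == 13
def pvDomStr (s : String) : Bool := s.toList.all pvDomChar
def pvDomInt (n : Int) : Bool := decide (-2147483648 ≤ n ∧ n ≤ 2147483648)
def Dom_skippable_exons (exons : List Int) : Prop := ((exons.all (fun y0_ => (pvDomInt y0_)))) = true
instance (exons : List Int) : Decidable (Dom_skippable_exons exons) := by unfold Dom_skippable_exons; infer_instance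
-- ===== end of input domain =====

-- B replaces A's cubic scan (for each start, re-summing every candidate slice) by prefix sums
-- mod 3 plus a right-to-left next-index-per-residue table, O(n); both Pythons are generators
-- and the equivalence proved is about the list of yielded values.

-- ===== PORT A =====
-- 'for j …: if …: yield …; break' = first j in the inner range whose test holds (findSome?).
def skippable_exons (exons : List Int) : List (List Int) :=
  if exons.length < 3 then []
  else
    (PySem.List.pyRange 1 (PySem.List.len exons) 1).foldl (fun acc i =>
      match (PySem.List.pyRange (i + 1) (PySem.List.len exons) 1).findSome? (fun j =>
          if PySem.Int.mod (PySem.List.slice exons (some i) (some j)).sum 3 = 0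
          then some (PySem.List.pyRange i j 1) else none) with
      | some r => acc ++ [r]
      | none => acc) []

-- ===== PORT B =====
-- pref[-1] on the (always non-empty) accumulator is PySem.List.pyGetD acc (-1) 0.
def pvBuildPref (exons : List Int) : List Int :=
  (PySem.List.slice exons none (some ((exons.length : Int) - 1))).foldl
    (fun acc e => acc ++ [PySem.Int.mod (PySem.List.pyGetD acc (-1) 0 + e) 3]) [0]

-- nxt is a Python list of three indices; ported as a triple with explicit set/get
-- (the residues used to index it are always 0, 1 or 2: Python % with positive divisor).
def pvSetNxt (t : Nat × Nat × Nat) (r : Int) (v : Nat) : Nat × Nat × Nat :=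
  if r = 0 then (v, t.2.1, t.2.2) else if r = 1 then (t.1, v, t.2.2) else (t.1, t.2.1, v)

def pvGetNxt (t : Nat × Nat × Nat) (r : Int) : Nat :=
  if r = 0 then t.1 else if r = 1 then t.2.1 else t.2.2

-- 'for i in range(n-2, 0, -1): … out.append(…)' then 'yield from reversed(out)':
-- descending recursion, the entry of the current i emitted after the smaller-i part.
-- pref[i+1] / pref[i+2] are in-range reads of the Python list, ported as getD.
def pvLoopB (pref : List Int) (n : Nat) : Nat → Nat × Nat × Nat → List (List Int)
  | 0, _ => []
  | i + 1, nxt =>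
    let nxt' := pvSetNxt nxt (pref.getD (i + 2) 0) (i + 2)
    let j := pvGetNxt nxt' (pref.getD (i + 1) 0)
    pvLoopB pref n i nxt' ++ (if j < n then [PySem.List.pyRange ((i : Int) + 1) (j : Int) 1] else [])

def skippable_exons_alt (exons : List Int) : List (List Int) :=
  if exons.length < 3 then []
  else
    pvLoopB (pvBuildPref exons) exons.length (exons.length - 2)
      (exons.length, exons.length, exons.length)

-- ===== PRECONDITION & SPEC =====
def Spec_skippable_exons (exons : List Int) (out : List (List Int)) : Prop := out = skippable_exons_alt exons
instance (exons : List Int) (out : List (List Int)) : Decidable (Spec_skippable_exons exons out) := by unfold Spec_skippable_exons; infer_instance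

-- ===== CLAIM (what is proved, stated in full; the proofs are below) =====
def Claim_equal_skippable_exons : Prop := ∀ (exons : List Int), Dom_skippable_exons exons → Spec_skippable_exons exons (skippable_exons exons)

-- ===== LEMMAS AND PROOFS =====

-- pvPrefF exons k = the value B's pref[k] holds: (sum of the first k exons) % 3.
def pvPrefF (exons : List Int) (k : Nat) : Int :=
  PySem.Int.mod ((exons.take k).sum) 3

-- first index j with lo ≤ j ≤ length-1 and pref[j] = r, else length (what B's nxt table holds)
def pvNextIdx (exons : List Int) (lo : Nat) (r : Int) : Nat :=
  match (List.range' lo (exons.length - lo)).find? (fun j => pvPrefF exons j == r) with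
  | some j => j
  | none => exons.length

-- the list of values yielded for a given outer index m (common description of both programs)
def pvEntry (exons : List Int) (m : Nat) : List (List Int) :=
  match (List.range' (m + 1) (exons.length - (m + 1))).find?
      (fun j => pvPrefF exons j == pvPrefF exons m) with
  | some j => [PySem.List.pyRange (m : Int) (j : Int) 1]
  | none => []

theorem pv_findSome?_if {α β : Type} (p : α → Bool) (f : α → β) (l : List α) :
    l.findSome? (fun x => if p x then some (f x) else none) = (l.find? p).map f := by
  induction l with
  | nil => rfl
  | cons x xs ih => by_cases h : p x <;> simp [List.findSome?, List.find?, h, ih]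

theorem pv_findSome?_cast {β : Type} (f : Int → Option β) (g : Nat → Option β) (l : List Nat)
    (h : ∀ x ∈ l, f (x : Int) = g x) :
    (l.map (fun k : Nat => (k : Int))).findSome? f = l.findSome? g := by
  induction l with
  | nil => rfl
  | cons x xs ih =>
    simp only [List.map_cons, List.findSome?]
    rw [h x (by simp)]
    cases g x with
    | some v => rfl
    | none => exact ih (fun y hy => h y (by simp [hy]))

theorem pv_pref_aux (exons : List Int) :
    ∀ m, m ≤ exons.length →
      (exons.take m).foldl (fun acc e => acc ++ [PySem.Int.mod (PySem.List.pyGetD acc (-1) 0 + e) 3]) [0]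
        = (List.range (m + 1)).map (pvPrefF exons) := by
  intro m
  induction m with
  | zero => intro _; simp [pvPrefF, PySem.Int.mod]
  | succ m ih =>
    intro h
    rw [List.take_succ_eq_append_getElem h, List.foldl_append, ih (by omega)]
    simp only [List.foldl_cons, List.foldl_nil]
    have hacc : (List.range (m + 1)).map (pvPrefF exons)
        = (List.range m).map (pvPrefF exons) ++ [pvPrefF exons m] := by
      rw [List.range_succ]; simp
    have hmod : PySem.Int.mod (pvPrefF exons m + exons[m]) 3 = pvPrefF exons (m + 1) := by
      unfold pvPrefF
      rw [List.take_succ_eq_append_getElem h, List.sum_append, List.sum_singleton]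
      rw [PySem.Int.mod_eq_emod_of_pos (by omega), PySem.Int.mod_eq_emod_of_pos (by omega),
          PySem.Int.mod_eq_emod_of_pos (by omega)]
      omega
    conv_lhs => rw [hacc, PySem.List.pyGetD_neg_one_append_singleton, hmod]
    rw [List.range_succ (n := m + 1)]
    simp [hacc]

-- B's pref list is exactly the table of pvPrefF values
theorem pv_pref_eq (exons : List Int) (h3 : 3 ≤ exons.length) :
    pvBuildPref exons = (List.range exons.length).map (pvPrefF exons) := by
  unfold pvBuildPref
  have h1 : ((exons.length : Int) - 1) = ((exons.length - 1 : Nat) : Int) := by omega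
  have h2 : exons.length - 1 + 1 = exons.length := by omega
  rw [h1, PySem.List.slice_to_natCast, pv_pref_aux exons (exons.length - 1) (by omega), h2]

-- A's slice-sum divisibility test is the prefix-residue test
theorem pv_test_eq (exons : List Int) (i j : Nat) (hij : i ≤ j) :
    (PySem.Int.mod (PySem.List.slice exons (some (i : Int)) (some (j : Int))).sum 3 = 0)
      ↔ pvPrefF exons j = pvPrefF exons i := by
  rw [PySem.List.slice_natCast]
  have hsplit : exons.take j = exons.take i ++ (exons.drop i).take (j - i) := by
    rw [← List.take_add]
    congr 1
    omega
  have hsum : ((exons.drop i).take (j - i)).sum = (exons.take j).sum - (exons.take i).sum := by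
    rw [hsplit, List.sum_append]; ring
  rw [hsum]
  unfold pvPrefF
  rw [PySem.Int.mod_eq_emod_of_pos (by omega), PySem.Int.mod_eq_emod_of_pos (by omega),
      PySem.Int.mod_eq_emod_of_pos (by omega)]
  constructor <;> intro h <;> omega

theorem pv_pyRange_cast (a n : Nat) :
    PySem.List.pyRange (a : Int) (n : Int) 1
      = (List.range' a (n - a)).map (fun k : Nat => (k : Int)) := by
  apply List.ext_getElem
  · simp [PySem.List.length_pyRange_one]
  · intro i h1 h2
    rw [PySem.List.getElem_pyRange_one]
    simp [List.getElem_range']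

-- A's inner loop for outer index m produces exactly pvEntry exons m
theorem pv_A_entry (exons : List Int) (m : Nat) :
    (PySem.List.pyRange ((m : Int) + 1) ((exons.length : Nat) : Int) 1).findSome? (fun j =>
        if PySem.Int.mod (PySem.List.slice exons (some (m : Int)) (some j)).sum 3 = 0
        then some (PySem.List.pyRange (m : Int) j 1) else none) =
      match pvEntry exons m with
      | [r] => some r
      | _ => none := by
  have hc : ((m : Int) + 1) = ((m + 1 : Nat) : Int) := by push_cast; ring
  rw [hc, pv_pyRange_cast (m + 1) exons.length]
  rw [pv_findSome?_cast _
    (fun j' : Nat => if (pvPrefF exons j' == pvPrefF exons m)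
        then some (PySem.List.pyRange (m : Int) (j' : Int) 1) else none) _ ?_]
  · rw [pv_findSome?_if]
    unfold pvEntry
    cases h : (List.range' (m + 1) (exons.length - (m + 1))).find?
        (fun j => pvPrefF exons j == pvPrefF exons m) with
    | some j => simp
    | none => simp
  · intro j' hj'
    have hb := List.mem_range'_1.mp hj'
    have ht := pv_test_eq exons m j' (by omega)
    by_cases h : pvPrefF exons j' = pvPrefF exons m
    · rw [if_pos (ht.mpr h)]
      simp [h]
    · rw [if_neg (fun hc2 => h (ht.mp hc2))]
      simp [h]

theorem pv_prefF_mem (exons : List Int) (k : Nat) :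
    pvPrefF exons k = 0 ∨ pvPrefF exons k = 1 ∨ pvPrefF exons k = 2 := by
  have h1 := PySem.Int.mod_nonneg ((exons.take k).sum) (b := 3) (by omega)
  have h2 := PySem.Int.mod_lt ((exons.take k).sum) (b := 3) (by omega)
  unfold pvPrefF
  omega

theorem pv_get_set (t : Nat × Nat × Nat) (r0 r : Int) (v : Nat)
    (h0 : r0 = 0 ∨ r0 = 1 ∨ r0 = 2) (h : r = 0 ∨ r = 1 ∨ r = 2) :
    pvGetNxt (pvSetNxt t r0 v) r = if r0 = r then v else pvGetNxt t r := by
  rcases h0 with rfl | rfl | rfl <;> rcases h with rfl | rfl | rfl <;>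
    simp [pvSetNxt, pvGetNxt]

-- one step of the right-to-left table: nextIdx lo = (lo if pref[lo] = r else nextIdx (lo+1))
theorem pv_nextIdx_step (exons : List Int) (lo : Nat) (r : Int) (hlo : lo < exons.length) :
    pvNextIdx exons lo r
      = if pvPrefF exons lo = r then lo else pvNextIdx exons (lo + 1) r := by
  unfold pvNextIdx
  have hc : exons.length - lo = (exons.length - (lo + 1)) + 1 := by omega
  rw [hc, List.range'_succ]
  by_cases h : pvPrefF exons lo = r
  · simp [List.find?, h]
  · simp only [List.find?]
    rw [if_neg h]
    have : (pvPrefF exons lo == r) = false := by simp [h]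
    simp [this]

theorem pv_nextIdx_none (exons : List Int) (r : Int) :
    pvNextIdx exons exons.length r = exons.length := by
  unfold pvNextIdx
  simp

-- B's loop, under the nxt-table invariant, produces the pvEntry lists in ascending order
theorem pv_loopB_eq (exons : List Int) (h3 : 3 ≤ exons.length) :
    ∀ (m : Nat), m ≤ exons.length - 2 → ∀ nxt : Nat × Nat × Nat,
      (∀ r : Int, (r = 0 ∨ r = 1 ∨ r = 2) → pvGetNxt nxt r = pvNextIdx exons (m + 2) r) →
      pvLoopB ((List.range exons.length).map (pvPrefF exons)) exons.length m nxt
        = (List.range' 1 m).flatMap (pvEntry exons) := by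
  intro m
  induction m with
  | zero => intro _ nxt _; simp [pvLoopB]
  | succ m ih =>
    intro hm nxt hinv
    show pvLoopB _ _ (m + 1) nxt = _
    rw [pvLoopB]
    have hg1 : ((List.range exons.length).map (pvPrefF exons)).getD (m + 2) 0
        = pvPrefF exons (m + 2) := PySem.List.getD_map_range _ _ _ _ (by omega)
    have hg2 : ((List.range exons.length).map (pvPrefF exons)).getD (m + 1) 0
        = pvPrefF exons (m + 1) := PySem.List.getD_map_range _ _ _ _ (by omega)
    have hinv' : ∀ r : Int, (r = 0 ∨ r = 1 ∨ r = 2) →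
        pvGetNxt (pvSetNxt nxt (pvPrefF exons (m + 2)) (m + 2)) r
          = pvNextIdx exons (m + 2) r := by
      intro r hr
      rw [pv_get_set nxt _ r (m + 2) (pv_prefF_mem exons (m + 2)) hr]
      rw [pv_nextIdx_step exons (m + 2) r (by omega)]
      by_cases h : pvPrefF exons (m + 2) = r
      · simp [h]
      · rw [if_neg h, if_neg h, hinv r hr]
    have hrec := ih (by omega) (pvSetNxt nxt (pvPrefF exons (m + 2)) (m + 2)) hinv'
    rw [hg1, hg2, hrec]
    have hj : pvGetNxt (pvSetNxt nxt (pvPrefF exons (m + 2)) (m + 2)) (pvPrefF exons (m + 1))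
        = pvNextIdx exons (m + 2) (pvPrefF exons (m + 1)) :=
      hinv' _ (pv_prefF_mem exons (m + 1))
    rw [hj]
    have hentry : (if pvNextIdx exons (m + 2) (pvPrefF exons (m + 1)) < exons.length
        then [PySem.List.pyRange ((m : Int) + 1)
          ((pvNextIdx exons (m + 2) (pvPrefF exons (m + 1)) : Nat) : Int) 1] else [])
        = pvEntry exons (m + 1) := by
      cases h : (List.range' (m + 2) (exons.length - (m + 2))).find?
          (fun j => pvPrefF exons j == pvPrefF exons (m + 1)) with
      | some j =>
        have hmem := List.mem_range'_1.mp (List.mem_of_find?_eq_some h)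
        have hni : pvNextIdx exons (m + 2) (pvPrefF exons (m + 1)) = j := by
          unfold pvNextIdx; rw [h]
        have he : pvEntry exons (m + 1)
            = [PySem.List.pyRange ((m + 1 : Nat) : Int) (j : Int) 1] := by
          unfold pvEntry; rw [h]
        rw [hni, he, if_pos (by omega)]
        have hc2 : ((m + 1 : Nat) : Int) = (m : Int) + 1 := by push_cast; ring
        rw [hc2]
      | none =>
        have hni : pvNextIdx exons (m + 2) (pvPrefF exons (m + 1)) = exons.length := by
          unfold pvNextIdx; rw [h]
        have he : pvEntry exons (m + 1) = [] := by
          unfold pvEntry; rw [h]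
        rw [hni, he, if_neg (lt_irrefl _)]
    rw [hentry]
    have hr1 : List.range' 1 (m + 1) = List.range' 1 m ++ [m + 1] := by
      rw [List.range'_1_concat]
      simp [Nat.add_comm]
    rw [hr1, List.flatMap_append]
    simp

-- pvEntry always yields zero or one value
theorem pv_entry_shape (exons : List Int) (m : Nat) :
    pvEntry exons m = [] ∨ ∃ r, pvEntry exons m = [r] := by
  unfold pvEntry
  cases (List.range' (m + 1) (exons.length - (m + 1))).find?
      (fun j => pvPrefF exons j == pvPrefF exons m) with
  | some j => right; exact ⟨_, rfl⟩
  | none => left; rfl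

-- A equals the flatMap description
theorem pv_A_eq (exons : List Int) (h3 : 3 ≤ exons.length) :
    skippable_exons exons = (List.range' 1 (exons.length - 2)).flatMap (pvEntry exons) := by
  unfold skippable_exons
  rw [if_neg (by omega)]
  rw [PySem.List.len_eq]
  have hcast : PySem.List.pyRange 1 ((exons.length : Nat) : Int) 1
      = (List.range' 1 (exons.length - 1)).map (fun k : Nat => (k : Int)) := by
    simpa using pv_pyRange_cast 1 exons.length
  rw [hcast, List.foldl_map]
  rw [PySem.List.foldl_congr_mem _ _
    (fun acc (m : Nat) => acc ++ pvEntry exons m) _ ?_]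
  · rw [PySem.List.foldl_append_eq_flatMap, List.nil_append]
    have h2 : exons.length - 1 = (exons.length - 2) + 1 := by omega
    rw [h2, List.range'_1_concat, List.flatMap_append]
    have h3' : pvEntry exons (1 + (exons.length - 2)) = [] := by
      unfold pvEntry
      have h0 : exons.length - (1 + (exons.length - 2) + 1) = 0 := by omega
      rw [h0]
      rfl
    simp [h3']
  · intro acc m hm
    simp only []
    rw [pv_A_entry exons m]
    rcases pv_entry_shape exons m with h | ⟨r, h⟩ <;> rw [h] <;> simp

-- B equals the same flatMap description
theorem pv_B_eq (exons : List Int) (h3 : 3 ≤ exons.length) :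
    skippable_exons_alt exons = (List.range' 1 (exons.length - 2)).flatMap (pvEntry exons) := by
  unfold skippable_exons_alt
  rw [if_neg (by omega), pv_pref_eq exons h3]
  apply pv_loopB_eq exons h3 (exons.length - 2) (le_refl _)
  intro r hr
  have hc : exons.length - 2 + 2 = exons.length := by omega
  rw [hc, pv_nextIdx_none]
  rcases hr with rfl | rfl | rfl <;> rfl

-- ===== VERDICT (by name: the statement is the Claim_ definition above) =====
theorem skippable_exons_spec : Claim_equal_skippable_exons := by
  intro exons _
  unfold Spec_skippable_exons
  by_cases h3 : exons.length < 3
  · unfold skippable_exons skippable_exons_alt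
    rw [if_pos h3, if_pos h3]
  · rw [pv_A_eq exons (by omega), pv_B_eq exons (by omega)]
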